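-- pv_equiv track=rewrite | github.com/michallbujak/TransportPy | utils/pool_utils.py | admissible_future_combinations
-- ===== SOURCE A (Python) =====
-- import itertools
--
-- def admissible_future_combinations(ods):
--     """
--     Function to create possible combination of sequence of origins and destinations,
--      where no destination proceeds corresponding origin
--     :param ods: list of labeled origins and destinations
--     :return: admissible combinations
--     """
--     all_combinations = itertools.permutations(ods)
--     admissible_combinations = []
--
--     def check_combination(comb):
--         # if comb[-2][0] == 'o':
--         #     return False
--         for num, element in enumerate(comb):
--             if element[0] == 'd':
--                 if element[1] in [t[1] for t in comb[num + 1:]]: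
--                     return False
--         else:
--             return True
--
--     for combination in all_combinations:
--         if check_combination(combination):
--             admissible_combinations.append(combination)
--
--     return admissible_combinations
-- ===== SOURCE B (Python) =====
-- def admissible_future_combinations(ods):
--     """Pruned depth-first search: build permutations by picking remaining items
--     in index order, skipping a 'd' item while another remaining item shares its id
--     (every completion would place that id after the destination)."""
--     result = []
--
--     def dfs(remaining, acc):
--         if not remaining:
--             result.append(tuple(acc))
--             return
--         for i in range(len(remaining)):
--             e = remaining[i]
--             rest = remaining[:i] + remaining[i + 1:]
--             if e[0] == 'd' and any(t[1] == e[1] for t in rest):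
--                 continue
--             dfs(rest, acc + [e])
--
--     dfs(list(ods), [])
--     return result
-- ===== Notes on version B (the rewrite author's own statement) =====
-- stated objective: alternative
-- what changed: B replaces generate-all-n!-permutations-then-filter by a pruned depth-first search that extends partial permutations in index order and skips a 'd' item whenever its id still occurs among the remaining items, so inadmissible subtrees are never entered.
import Mathlib
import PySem

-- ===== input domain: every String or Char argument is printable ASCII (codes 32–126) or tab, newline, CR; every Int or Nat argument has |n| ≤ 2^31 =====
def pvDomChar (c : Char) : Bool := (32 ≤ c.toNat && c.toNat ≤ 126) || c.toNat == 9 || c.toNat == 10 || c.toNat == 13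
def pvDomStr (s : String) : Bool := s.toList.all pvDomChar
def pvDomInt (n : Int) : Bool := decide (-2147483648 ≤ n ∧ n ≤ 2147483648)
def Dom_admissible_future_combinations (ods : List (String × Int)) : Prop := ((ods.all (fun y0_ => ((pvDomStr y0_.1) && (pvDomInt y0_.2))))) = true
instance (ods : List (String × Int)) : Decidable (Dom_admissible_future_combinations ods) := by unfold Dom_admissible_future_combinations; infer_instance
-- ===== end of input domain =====

-- B replaces "generate all n! permutations, then filter" by a pruned depth-first search
-- that never enters a branch whose placed destination still has its id among the remaining
-- items (objective: alternative — a different algorithm of similar measured cost).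

-- ===== PORT A =====
-- check_combination: for each element, if its label equals 'd' and its id occurs among the
-- later elements, return False; otherwise True (the for/else always reaches 'return True').
def checkCombination : List (String × Int) → Bool
  | [] => true
  | e :: rest =>
    if e.1 == "d" && (rest.map Prod.snd).contains e.2 then false
    else checkCombination rest

-- itertools.permutations(ods) is PySem.List.permutations; the append-if loop is List.filter.
def admissible_future_combinations (ods : List (String × Int)) : List (List (String × Int)) :=
  (PySem.List.permutations ods ods.length).filter checkCombination

-- ===== PORT B =====
-- picks l = [(l[i], l[:i]+l[i+1:]) for i in range(len(l))], the choices of B's inner loop.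
def picksB {α : Type} : List α → List (α × List α)
  | [] => []
  | x :: xs => (x, xs) :: (picksB xs).map (fun pr => (pr.1, x :: pr.2))

-- B's recursive dfs; the Nat argument is fuel for totality, always called with rem.length.
def dfsB : List (String × Int) → List (String × Int) → Nat → List (List (String × Int))
  | _, acc, 0 => [acc]
  | rem, acc, n + 1 =>
    (picksB rem).flatMap (fun pr =>
      if pr.1.1 == "d" && (pr.2.map Prod.snd).contains pr.1.2 then []
      else dfsB pr.2 (acc ++ [pr.1]) n)

def admissible_future_combinations_alt (ods : List (String × Int)) : List (List (String × Int)) :=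
  dfsB ods [] ods.length

-- ===== PRECONDITION & SPEC =====
def Spec_admissible_future_combinations (ods : List (String × Int)) (out : List (List (String × Int))) : Prop := out = admissible_future_combinations_alt ods
instance (ods : List (String × Int)) (out : List (List (String × Int))) : Decidable (Spec_admissible_future_combinations ods out) := by unfold Spec_admissible_future_combinations; infer_instance

-- ===== CLAIM (what is proved, stated in full; the proofs are below) =====
def Claim_equal_admissible_future_combinations : Prop := ∀ (ods : List (String × Int)), Dom_admissible_future_combinations ods → Spec_admissible_future_combinations ods (admissible_future_combinations ods)

-- ===== LEMMAS AND PROOFS =====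

theorem picksB_length {α : Type} : ∀ {l : List α} {pr : α × List α},
    pr ∈ picksB l → pr.2.length + 1 = l.length := by
  intro l
  induction l with
  | nil => intro pr h; simp [picksB] at h
  | cons x xs ih =>
    intro pr h
    simp only [picksB, List.mem_cons, List.mem_map] at h
    rcases h with h | ⟨q, hq, rfl⟩
    · subst h; simp
    · simpa using ih hq

-- the index-selection loop of permutations, re-expressed through picksB
theorem picksB_flatMap {α β : Type} : ∀ (xs : List α) (G : α → List α → List β),
    (picksB xs).flatMap (fun pr => G pr.1 pr.2)
      = (List.range xs.length).flatMap (fun i =>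
          match xs[i]? with
          | none => []
          | some a => G a (xs.eraseIdx i)) := by
  intro xs
  induction xs with
  | nil => intro G; simp [picksB]
  | cons x xs ih =>
    intro G
    simp only [picksB, List.flatMap_cons, List.length_cons, List.range_succ_eq_map,
      List.flatMap_map]
    rw [ih (fun a r => G a (x :: r))]
    simp

theorem perms_succ {α : Type} (xs : List α) (n : Nat) :
    PySem.List.permutations xs (n + 1)
      = (picksB xs).flatMap (fun pr => (PySem.List.permutations pr.2 n).map (pr.1 :: ·)) := by
  rw [picksB_flatMap xs (fun a r => (PySem.List.permutations r n).map (a :: ·))]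
  simp only [PySem.List.permutations]
  refine List.flatMap_congr ?_
  intro i _
  cases h : xs[i]? <;> simp

theorem checkCombination_cons (e : String × Int) (p : List (String × Int)) :
    checkCombination (e :: p)
      = if e.1 == "d" && (p.map Prod.snd).contains e.2 then false else checkCombination p := rfl

theorem contains_snd_of_perm {p r : List (String × Int)} (h : p.Perm r) (v : Int) :
    (p.map Prod.snd).contains v = (r.map Prod.snd).contains v := by
  have hiff : v ∈ p.map Prod.snd ↔ v ∈ r.map Prod.snd := (h.map Prod.snd).mem_iff
  rw [Bool.eq_iff_iff]
  simp [hiff]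

-- main invariant: the pruned DFS computes exactly the filtered permutation list
theorem dfsB_eq : ∀ (n : Nat) (xs acc : List (String × Int)), xs.length = n →
    dfsB xs acc n
      = ((PySem.List.permutations xs n).filter checkCombination).map (fun p => acc ++ p) := by
  intro n
  induction n with
  | zero =>
    intro xs acc _
    simp [dfsB, PySem.List.permutations, checkCombination]
  | succ n ih =>
    intro xs acc hlen
    rw [dfsB, perms_succ, List.filter_flatMap, List.map_flatMap]
    refine List.flatMap_congr ?_
    rintro ⟨e, r⟩ hmem
    have hr : r.length = n := by have := picksB_length hmem; simpa [hlen] using this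
    have hperm : ∀ p ∈ PySem.List.permutations r n, p.Perm r := by
      intro p hp
      exact PySem.List.perm_of_mem_permutations (by simpa [hr] using hp)
    simp only [List.filter_map]
    have hfc : List.filter (checkCombination ∘ (fun p => e :: p)) (PySem.List.permutations r n)
        = List.filter (fun p =>
            if e.1 == "d" && (r.map Prod.snd).contains e.2 then false
            else checkCombination p) (PySem.List.permutations r n) := by
      refine List.filter_congr ?_
      intro p hp
      simp only [Function.comp_apply, checkCombination_cons,
        contains_snd_of_perm (hperm p hp) e.2]
    rw [hfc]
    by_cases hbad : (e.1 == "d" && (r.map Prod.snd).contains e.2) = true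
    · have hb : e.1 = "d" ∧ e.2 ∈ r.map Prod.snd := by simpa using hbad
      simp [hb.1, hb.2]
    · simp only [hbad, if_neg, Bool.false_eq_true, not_false_eq_true]
      rw [ih r (acc ++ [e]) hr]
      simp [Function.comp, List.append_assoc]

-- ===== VERDICT (by name: the statement is the Claim_ definition above) =====
theorem admissible_future_combinations_spec : Claim_equal_admissible_future_combinations := by
  intro ods _
  unfold Spec_admissible_future_combinations admissible_future_combinations
    admissible_future_combinations_alt
  rw [dfsB_eq ods.length ods [] rfl]
  simp
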